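-- pv_equiv track=rewrite | github.com/hajraQURESHI/HTMLFILE | 2021_MC_33_CEP1.py | stepcount
-- ===== SOURCE A (Python) =====
-- def stepcount(chrom):
--     stepcounter,b=0,0
--     var2=1           #var2 will be use in every condition
--     for j in range(len(chrom)-1):
--
--         #first condition
--         if chrom[j]<chrom[j+1]:
--             b=chrom[j]
--             while (b!=chrom[j+1]+1):
--                 stepcounter+=1
--                 b+=1
--             var2+=1
--          #second condition
--         if chrom[j]>chrom[j+1]:
--             b=chrom[j]
--             while (b!=chrom[j+1]-1):
--                 stepcounter+=1
--                 b-=1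
--             var2+=1
--         # Third condition
--         if chrom[j]==chrom[j+1]:
--             stepcounter+=1
--             var2+=1
--     return stepcounter+1
-- ===== SOURCE B (Python) =====
-- def stepcount(chrom):
--     return sum(abs(x - y) + 1 for x, y in zip(chrom, chrom[1:])) + 1
-- ===== Notes on version B (the rewrite author's own statement) =====
-- stated objective: faster
-- what changed: Replaces the per-pair unit-step while loops (one iteration per integer between neighbours) by the closed form abs(diff)+1 summed in one pass over adjacent pairs.
import Mathlib
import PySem

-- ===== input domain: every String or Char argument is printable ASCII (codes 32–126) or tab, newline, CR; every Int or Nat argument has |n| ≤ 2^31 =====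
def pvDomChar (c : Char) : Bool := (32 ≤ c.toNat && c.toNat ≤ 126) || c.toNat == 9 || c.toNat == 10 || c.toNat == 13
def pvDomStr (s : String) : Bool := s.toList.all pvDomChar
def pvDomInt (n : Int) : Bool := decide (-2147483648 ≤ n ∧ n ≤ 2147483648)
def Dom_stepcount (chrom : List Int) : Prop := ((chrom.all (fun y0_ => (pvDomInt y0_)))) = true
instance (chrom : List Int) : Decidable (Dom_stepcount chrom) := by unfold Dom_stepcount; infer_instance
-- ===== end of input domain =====

-- B replaces A's per-pair unit-step while loops by the closed form |diff|+1 summed in one pass (faster).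


-- ===== PORT A =====
-- `while (b != chrom[j+1]+1): stepcounter+=1; b+=1` — entered only with b = chrom[j] < chrom[j+1],
-- so along every reachable state b ≤ target and `b != target+1` coincides with `b < target+1`
-- (the strict form is used so Lean sees termination; exact on all states Python reaches).
def whileUp (b target sc : Int) : Int :=
  if b < target + 1 then whileUp (b + 1) target (sc + 1) else sc
termination_by (target + 1 - b).toNat
decreasing_by omega

-- `while (b != chrom[j+1]-1): stepcounter+=1; b-=1` — entered only with b = chrom[j] > chrom[j+1],
-- so `b != target-1` coincides with `b > target-1` on every reachable state.
def whileDown (b target sc : Int) : Int :=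
  if b > target - 1 then whileDown (b - 1) target (sc + 1) else sc
termination_by (b - (target - 1)).toNat
decreasing_by omega

-- the `for j in range(len(chrom)-1)` loop over chrom[j], chrom[j+1]: adjacent pairs of the list
def loopA (chrom : List Int) (sc : Int) : Int :=
  match chrom with
  | a :: b :: rest =>
      let sc1 := if a < b then whileUp a b sc else sc
      let sc2 := if a > b then whileDown a b sc1 else sc1
      let sc3 := if a == b then sc2 + 1 else sc2
      loopA (b :: rest) sc3
  | _ => sc

def stepcount (chrom : List Int) : Int := loopA chrom 0 + 1

-- ===== PORT B =====
def stepcount_alt (chrom : List Int) : Int :=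
  ((chrom.zip chrom.tail).map (fun p => ((p.1 - p.2).natAbs : Int) + 1)).sum + 1

-- ===== PRECONDITION & SPEC =====
def Spec_stepcount (chrom : List Int) (out : Int) : Prop := out = stepcount_alt chrom
instance (chrom : List Int) (out : Int) : Decidable (Spec_stepcount chrom out) := by unfold Spec_stepcount; infer_instance

-- ===== CLAIM (what is proved, stated in full; the proofs are below) =====
def Claim_equal_stepcount : Prop := ∀ (chrom : List Int), Dom_stepcount chrom → Spec_stepcount chrom (stepcount chrom)

-- ===== LEMMAS AND PROOFS =====

theorem whileUp_eq (b target sc : Int) (h : b ≤ target) :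
    whileUp b target sc = sc + (target - b) + 1 := by
  rw [whileUp, if_pos (by omega : b < target + 1)]
  by_cases hb : b + 1 ≤ target
  · rw [whileUp_eq (b + 1) target (sc + 1) hb]; omega
  · rw [whileUp, if_neg (by omega)]; omega
termination_by (target + 1 - b).toNat
decreasing_by omega

theorem whileDown_eq (b target sc : Int) (h : target ≤ b) :
    whileDown b target sc = sc + (b - target) + 1 := by
  rw [whileDown, if_pos (by omega : b > target - 1)]
  by_cases hb : target ≤ b - 1
  · rw [whileDown_eq (b - 1) target (sc + 1) hb]; omega
  · rw [whileDown, if_neg (by omega)]; omega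
termination_by (b - (target - 1)).toNat
decreasing_by omega

theorem loopA_eq (chrom : List Int) (sc : Int) :
    loopA chrom sc = sc + ((chrom.zip chrom.tail).map (fun p => ((p.1 - p.2).natAbs : Int) + 1)).sum := by
  induction chrom generalizing sc with
  | nil => simp [loopA]
  | cons a rest ih =>
    cases rest with
    | nil => simp [loopA]
    | cons b rest' =>
      rw [loopA, ih]
      simp only [List.tail_cons, List.zip_cons_cons, List.map_cons, List.sum_cons]
      rcases lt_trichotomy a b with h | h | h
      · rw [if_pos h, if_neg (show ¬ a > b by omega),
          if_neg (show ¬ (a == b) = true by simp only [beq_iff_eq]; omega),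
          whileUp_eq a b sc (le_of_lt h)]
        omega
      · rw [if_neg (show ¬ a < b by omega), if_neg (show ¬ a > b by omega),
          if_pos (show (a == b) = true by simp [h])]
        omega
      · rw [if_neg (show ¬ a < b by omega), if_pos (show a > b from h),
          if_neg (show ¬ (a == b) = true by simp only [beq_iff_eq]; omega),
          whileDown_eq a b sc (le_of_lt h)]
        omega

-- ===== VERDICT (by name: the statement is the Claim_ definition above) =====
theorem stepcount_spec : Claim_equal_stepcount := by
  intro chrom _
  unfold Spec_stepcount stepcount stepcount_alt
  rw [loopA_eq]
  omega
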